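-- pv_equiv track=rewrite | github.com/cac2333/aidac | benchmarks/parseqs.py | find_last_unbalanced_char_index
-- ===== SOURCE A (Python) =====
-- def find_last_unbalanced_char_index(string):
--     expected_lbchar = 0
--     expected_lpchar = 0
--     for i in range(len(string) - 1, -1, -1):
--         if string[i] == ']':
--             expected_lbchar += 1
--         elif string[i] == '[':
--             expected_lbchar -= 1
--         elif string[i] == ')':
--             expected_lpchar += 1
--         elif string[i] == '(':
--             expected_lpchar -= 1
--         if expected_lbchar + expected_lpchar == -1:
--             return i
--     return -1
-- ===== SOURCE B (Python) =====
-- def find_last_unbalanced_char_index(string):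
--     weight = {']': 1, ')': 1, '[': -1, '(': -1}
--     total = sum(weight.get(c, 0) for c in string)
--     # suffix balance from i equals total - prefix(i), so it is -1 exactly
--     # when prefix(i) == total + 1; keep the LAST such i in a forward pass.
--     best = -1
--     run = 0
--     for i, c in enumerate(string):
--         if run == total + 1:
--             best = i
--         run += weight.get(c, 0)
--     return best
-- ===== Notes on version B (the rewrite author's own statement) =====
-- stated objective: alternative
-- what changed: B first computes the total balance of the whole string, then does a single forward pass over prefix sums recording the LAST index where prefix == total+1 (equivalent to suffix balance -1), instead of A's backward scan with two counters and an early return at the first hit.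
import Mathlib
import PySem

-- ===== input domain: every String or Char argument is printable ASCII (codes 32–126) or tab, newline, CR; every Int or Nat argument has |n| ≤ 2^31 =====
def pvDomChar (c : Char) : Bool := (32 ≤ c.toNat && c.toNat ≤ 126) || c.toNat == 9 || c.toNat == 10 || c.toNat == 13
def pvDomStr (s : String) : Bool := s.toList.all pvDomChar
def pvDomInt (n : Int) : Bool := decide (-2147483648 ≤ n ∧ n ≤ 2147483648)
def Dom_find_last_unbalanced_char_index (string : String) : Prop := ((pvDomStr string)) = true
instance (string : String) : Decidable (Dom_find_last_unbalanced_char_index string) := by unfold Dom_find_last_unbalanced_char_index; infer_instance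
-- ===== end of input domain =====

-- B replaces A's backward early-return scan by: compute the total balance once, then one
-- forward pass keeping the LAST index whose prefix balance equals total+1 (alternative).

-- ===== PORT A =====
-- the backward for-loop of A: cs is the string reversed, i the current Python index
def fluciLoopA (cs : List Char) (i lb lp : Int) : Int :=
  match cs with
  | [] => -1
  | c :: rest =>
    let lb' := if c = ']' then lb + 1 else lb
    let lp' := if c = ']' then lp
      else if c = '[' then lp
      else if c = ')' then lp + 1
      else if c = '(' then lp - 1
      else lp
    let lb'' := if c = ']' then lb' else if c = '[' then lb' - 1 else lb'
    if lb'' + lp' = -1 then i else fluciLoopA rest (i - 1) lb'' lp'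

def find_last_unbalanced_char_index (string : String) : Int :=
  fluciLoopA string.toList.reverse ((string.toList.length : Int) - 1) 0 0

-- ===== PORT B =====
def fluciWeight : PySem.Dict Char Int :=
  PySem.Dict.ofList [(']', 1), (')', 1), ('[', -1), ('(', -1)]

-- total = sum(weight.get(c, 0) for c in string)
def fluciTotal (cs : List Char) : Int :=
  (cs.map (fun c => fluciWeight.getD c 0)).sum

-- the forward for-loop of B: i the enumerate index, run the prefix balance,
-- best the last index seen with run == total + 1
def fluciLoopB (cs : List Char) (i run best total : Int) : Int :=
  match cs with
  | [] => best
  | c :: rest =>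
    let best' := if run = total + 1 then i else best
    fluciLoopB rest (i + 1) (run + fluciWeight.getD c 0) best' total

def find_last_unbalanced_char_index_alt (string : String) : Int :=
  fluciLoopB string.toList 0 0 (-1) (fluciTotal string.toList)

-- ===== PRECONDITION & SPEC =====
def Spec_find_last_unbalanced_char_index (string : String) (out : Int) : Prop := out = find_last_unbalanced_char_index_alt string
instance (string : String) (out : Int) : Decidable (Spec_find_last_unbalanced_char_index string out) := by unfold Spec_find_last_unbalanced_char_index; infer_instance

-- ===== CLAIM =====
def Claim_equal_find_last_unbalanced_char_index : Prop := ∀ (string : String), Dom_find_last_unbalanced_char_index string → Spec_find_last_unbalanced_char_index string (find_last_unbalanced_char_index string)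

-- ===== LEMMAS AND PROOFS =====

-- the per-character balance weight
def fluciW (c : Char) : Int :=
  if c = ']' then 1 else if c = '[' then -1
  else if c = ')' then 1 else if c = '(' then -1 else 0

-- sum of weights of a list
def fluciSum (l : List Char) : Int := (l.map fluciW).sum

-- canonical single-accumulator form of A's backward loop (proof device)
def fluciLoopC (cs : List Char) (i t : Int) : Int :=
  match cs with
  | [] => -1
  | c :: rest =>
    let t' := t + fluciW c
    if t' = -1 then i else fluciLoopC rest (i - 1) t'

-- option form of A's loop: offset (from the start of cs) of the first hit
def fluciHitO (cs : List Char) (t : Int) : Option Nat :=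
  match cs with
  | [] => none
  | c :: rest =>
    if t + fluciW c = -1 then some 0 else (fluciHitO rest (t + fluciW c)).map (· + 1)

-- option form of B's loop: offset of the last position with run + prefix = total + 1
def fluciLastO (cs : List Char) (run total : Int) : Option Nat :=
  match cs with
  | [] => none
  | c :: rest =>
    match (fluciLastO rest (run + fluciW c) total).map (· + 1) with
    | some j => some j
    | none => if run = total + 1 then some 0 else none

theorem fluciWeight_getD (c : Char) : fluciWeight.getD c 0 = fluciW c := by
  by_cases h1 : c = ']'
  · subst h1; decide
  by_cases h2 : c = '['
  · subst h2; decide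
  by_cases h3 : c = ')'
  · subst h3; decide
  by_cases h4 : c = '('
  · subst h4; decide
  have he : fluciWeight = PySem.Dict.mk [(']', 1), (')', 1), ('[', -1), ('(', -1)] := by decide
  rw [he]
  have b1 : ((']' : Char) == c) = false := beq_eq_false_iff_ne.mpr (Ne.symm h1)
  have b2 : (('[' : Char) == c) = false := beq_eq_false_iff_ne.mpr (Ne.symm h2)
  have b3 : ((')' : Char) == c) = false := beq_eq_false_iff_ne.mpr (Ne.symm h3)
  have b4 : (('(' : Char) == c) = false := beq_eq_false_iff_ne.mpr (Ne.symm h4)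
  simp [fluciW, PySem.Dict.getD, PySem.Dict.get?, List.find?, b1, b2, b3, b4, h1, h2, h3, h4]

theorem fluciTotal_eq (cs : List Char) : fluciTotal cs = fluciSum cs := by
  unfold fluciTotal fluciSum
  simp [fluciWeight_getD]

-- A's elif-chain update changes the two counters' sum by exactly the weight of c
theorem fluciStep (c : Char) (lb lp : Int) :
    ((if c = ']' then (if c = ']' then lb + 1 else lb)
      else if c = '[' then (if c = ']' then lb + 1 else lb) - 1
      else (if c = ']' then lb + 1 else lb)) +
     (if c = ']' then lp else if c = '[' then lp
      else if c = ')' then lp + 1 else if c = '(' then lp - 1 else lp))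
      = lb + lp + fluciW c := by
  simp only [fluciW]; split_ifs <;> omega

theorem fluciLoopA_eq_C (cs : List Char) : ∀ (i lb lp : Int),
    fluciLoopA cs i lb lp = fluciLoopC cs i (lb + lp) := by
  induction cs with
  | nil => intro i lb lp; simp [fluciLoopA, fluciLoopC]
  | cons c rest ih =>
    intro i lb lp
    simp only [fluciLoopA, fluciLoopC]
    rw [ih, fluciStep]

theorem fluciLoopC_hitO (cs : List Char) : ∀ (i t : Int),
    fluciLoopC cs i t = match fluciHitO cs t with
      | some k => i - (k : Int)
      | none => -1 := by
  induction cs with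
  | nil => intro i t; simp [fluciLoopC, fluciHitO]
  | cons c rest ih =>
    intro i t
    simp only [fluciLoopC, fluciHitO]
    by_cases h : t + fluciW c = -1
    · simp [h]
    · simp only [h, ite_false]
      rw [ih]
      cases fluciHitO rest (t + fluciW c) with
      | none => simp
      | some k => simp; ring

theorem fluciLoopB_lastO (cs : List Char) : ∀ (i run best total : Int),
    fluciLoopB cs i run best total = match fluciLastO cs run total with
      | some j => i + (j : Int)
      | none => best := by
  induction cs with
  | nil => intro i run best total; simp [fluciLoopB, fluciLastO]
  | cons c rest ih =>
    intro i run best total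
    simp only [fluciLoopB, fluciLastO, fluciWeight_getD]
    rw [ih]
    cases fluciLastO rest (run + fluciW c) total with
    | none => split_ifs <;> simp
    | some j => simp only [Option.map_some]; push_cast; ring

theorem fluciLastO_shift (cs : List Char) : ∀ (run total : Int),
    fluciLastO cs run total = fluciLastO cs 0 (total - run) := by
  induction cs with
  | nil => intro run total; simp [fluciLastO]
  | cons c rest ih =>
    intro run total
    simp only [fluciLastO]
    rw [ih (run + fluciW c) total, ih (0 + fluciW c) (total - run)]
    rw [show total - (run + fluciW c) = total - run - (0 + fluciW c) from by ring]
    by_cases h : run = total + 1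
    · have h2 : (0 : Int) = total - run + 1 := by omega
      simp only [h, h2, ite_true]
    · have h2 : ¬ ((0 : Int) = total - run + 1) := by omega
      simp only [if_neg h, if_neg h2]

theorem fluciHitO_append (l l' : List Char) : ∀ (t : Int),
    fluciHitO (l ++ l') t = match fluciHitO l t with
      | some k => some k
      | none => (fluciHitO l' (t + fluciSum l)).map (· + l.length) := by
  induction l with
  | nil =>
    intro t
    simp [fluciHitO, fluciSum, Option.map_id']
  | cons c rest ih =>
    intro t
    simp only [List.cons_append, fluciHitO]
    by_cases h : t + fluciW c = -1
    · simp [h]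
    · simp only [h, ite_false]
      rw [ih]
      cases fluciHitO rest (t + fluciW c) with
      | some k => simp
      | none =>
        simp only [Option.map_map]
        have : t + fluciW c + fluciSum rest = t + fluciSum (c :: rest) := by
          simp [fluciSum]; ring
        rw [this]
        congr 1

theorem fluciSum_reverse (l : List Char) : fluciSum l.reverse = fluciSum l := by
  unfold fluciSum
  rw [List.map_reverse, List.sum_reverse]

-- offsets returned by fluciHitO are in range
theorem fluciHitO_lt (cs : List Char) : ∀ (t : Int) (k : Nat),
    fluciHitO cs t = some k → k < cs.length := by
  induction cs with
  | nil => intro t k h; simp [fluciHitO] at h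
  | cons c rest ih =>
    intro t k h
    simp only [fluciHitO] at h
    by_cases hc : t + fluciW c = -1
    · rw [if_pos hc] at h
      injection h with h
      simp only [List.length_cons]; omega
    · rw [if_neg hc] at h
      cases hr : fluciHitO rest (t + fluciW c) with
      | none => rw [hr] at h; simp at h
      | some k' =>
        rw [hr] at h
        simp only [Option.map_some] at h
        injection h with h
        have := ih (t + fluciW c) k' hr
        simp only [List.length_cons]
        omega

-- core: B's last prefix hit corresponds to A's first suffix hit
theorem fluciCore (cs : List Char) :
    fluciLastO cs 0 (fluciSum cs) =
    (fluciHitO cs.reverse 0).map (fun k => cs.length - 1 - k) := by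
  induction cs with
  | nil => simp [fluciLastO, fluciHitO]
  | cons c rest ih =>
    rw [List.reverse_cons, fluciHitO_append]
    cases hh : fluciHitO rest.reverse 0 with
    | some k =>
      have hk : k < rest.length := by
        have := fluciHitO_lt rest.reverse 0 k hh
        simpa using this
      rw [hh] at ih
      simp only [Option.map_some] at ih
      simp only [fluciLastO]
      rw [fluciLastO_shift rest (0 + fluciW c) (fluciSum (c :: rest))]
      have hs : fluciSum (c :: rest) - (0 + fluciW c) = fluciSum rest := by
        simp [fluciSum]
      rw [hs, ih]
      simp only [Option.map_some, List.length_cons]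
      congr 1
      omega
    | none =>
      rw [hh] at ih
      simp only [Option.map_none] at ih
      simp only [fluciLastO]
      rw [fluciLastO_shift rest (0 + fluciW c) (fluciSum (c :: rest))]
      have hs : fluciSum (c :: rest) - (0 + fluciW c) = fluciSum rest := by
        simp [fluciSum]
      rw [hs, ih]
      simp only [Option.map_none, fluciHitO, fluciSum_reverse]
      by_cases h : (0 : Int) = fluciSum (c :: rest) + 1
      · have h2 : 0 + fluciSum rest + fluciW c = -1 := by
          simp only [fluciSum, List.map_cons, List.sum_cons] at h ⊢; omega
        rw [if_pos h2, if_pos h]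
        simp
      · have h2 : ¬ (0 + fluciSum rest + fluciW c = -1) := by
          simp only [fluciSum, List.map_cons, List.sum_cons] at h ⊢; omega
        rw [if_neg h2, if_neg (fun hh2 => h hh2)]
        rfl

-- ===== VERDICT =====
theorem find_last_unbalanced_char_index_spec : Claim_equal_find_last_unbalanced_char_index := by
  intro s _
  unfold Spec_find_last_unbalanced_char_index find_last_unbalanced_char_index find_last_unbalanced_char_index_alt
  rw [fluciLoopA_eq_C, show (0 : Int) + 0 = 0 from rfl, fluciLoopC_hitO,
    fluciLoopB_lastO, fluciTotal_eq]
  have hcore := fluciCore s.toList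
  cases hh : fluciHitO s.toList.reverse 0 with
  | none =>
    rw [hh] at hcore
    simp only [Option.map_none] at hcore
    rw [hcore]
  | some k =>
    have hk : k < s.toList.length := by
      have := fluciHitO_lt s.toList.reverse 0 k hh
      simpa using this
    rw [hh] at hcore
    simp only [Option.map_some] at hcore
    rw [hcore]
    simp only [Nat.sub_sub]
    have hcast : ((s.toList.length - (1 + k) : Nat) : Int) = (s.toList.length : Int) - 1 - (k : Int) := by
      omega
    simp only [hcast]
    ring
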